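-- pv_equiv track=rewrite | github.com/chaseruskin/glyph | sim/hamming.py | get_parity_bits
-- ===== SOURCE A (Python) =====
-- def get_parity_bits(k: int):
--     '''
--     Finds _P_, the number of required parity bits (excluding zero-th), such
--     that K + 1 = 2^P - P.
--     '''
--     d = k + 1
--     # find P such that D = 2^P - P
--     p = 2
--     while True:
--         if d <= 2**p - p:
--             break
--         p += 1
--     return p
-- ===== SOURCE B (Python) =====
-- def get_parity_bits(k: int):
--     '''
--     Finds _P_, the number of required parity bits (excluding zero-th), such
--     that K + 1 = 2^P - P.
--     '''
--     d = k + 1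
--     if d <= 2:
--         return 2
--     lo, hi = 2, max(2, d.bit_length()) + 2
--     while lo < hi:
--         mid = (lo + hi) // 2
--         if 2**mid - mid >= d:
--             hi = mid
--         else:
--             lo = mid + 1
--     return lo
-- ===== Notes on version B (the rewrite author's own statement) =====
-- stated objective: faster
-- what changed: Replaces A's linear scan incrementing p one-by-one with a binary search for the minimal p>=2 satisfying 2^p-p >= k+1, between lo=2 and a bit_length-derived upper bound proven to satisfy the predicate.
import Mathlib
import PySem

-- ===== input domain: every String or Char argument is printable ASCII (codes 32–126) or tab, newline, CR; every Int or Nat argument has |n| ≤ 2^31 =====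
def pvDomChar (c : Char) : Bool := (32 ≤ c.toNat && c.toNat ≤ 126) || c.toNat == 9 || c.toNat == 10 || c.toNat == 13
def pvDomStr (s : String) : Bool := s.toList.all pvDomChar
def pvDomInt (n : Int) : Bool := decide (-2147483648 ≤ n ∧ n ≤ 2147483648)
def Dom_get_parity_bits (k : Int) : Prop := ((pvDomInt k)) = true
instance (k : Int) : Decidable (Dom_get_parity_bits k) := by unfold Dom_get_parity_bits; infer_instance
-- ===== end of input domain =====

-- B replaces A's one-by-one linear scan with a binary search for the minimal p ≥ 2
-- with 2^p - p ≥ k+1; objective: faster (fewer predicate tests).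

-- ===== PORT A =====
-- termination helper for A's `while True` loop (cited by the port's decreasing_by)
theorem pvTwoMulLeTwoPow : ∀ n : Nat, 2 * n ≤ 2 ^ n
  | 0 => by norm_num
  | 1 => by norm_num
  | (n + 2) => by
      have ih := pvTwoMulLeTwoPow (n + 1)
      have h2 : 2 ≤ 2 ^ (n + 1) := Nat.one_lt_two_pow_iff.mpr (by omega)
      calc 2 * (n + 2) = 2 * (n + 1) + 2 := by ring
        _ ≤ 2 ^ (n + 1) + 2 ^ (n + 1) := by omega
        _ = 2 ^ (n + 2) := by ring

-- A's loop: `while True: if d <= 2**p - p: break; p += 1; return p`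
def pvALoop (d : Int) (p : Nat) : Int :=
  if d ≤ 2 ^ p - (p : Int) then (p : Int) else pvALoop d (p + 1)
termination_by d.toNat + 2 - p
decreasing_by
  rename_i h
  have h1 : (p : Int) ≤ 2 ^ p - (p : Int) := by
    have := pvTwoMulLeTwoPow p
    have : ((2 * p : Nat) : Int) ≤ ((2 ^ p : Nat) : Int) := by exact_mod_cast this
    push_cast at this
    omega
  have h2 : (p : Int) < d := by omega
  have h3 : p < d.toNat := by omega
  omega

def get_parity_bits (k : Int) : Int :=
  pvALoop (k + 1) 2

-- ===== PORT B =====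
-- binary search: while lo < hi: mid = (lo+hi)//2; if 2**mid - mid >= d: hi = mid else lo = mid+1
def pvBLoop (d : Int) (lo hi : Nat) : Nat :=
  if lo < hi then
    let mid := (lo + hi) / 2
    if 2 ^ mid - (mid : Int) ≥ d then pvBLoop d lo mid
    else pvBLoop d (mid + 1) hi
  else lo
termination_by hi - lo
decreasing_by all_goals omega

def get_parity_bits_alt (k : Int) : Int :=
  let d := k + 1
  if d ≤ 2 then 2
  else
    -- d.bit_length() for d ≥ 1 equals Nat.log2 d.toNat + 1 (exact on positive ints)
    let bl := Nat.log2 d.toNat + 1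
    (pvBLoop d 2 (Nat.max 2 bl + 2) : Int)

-- ===== PRECONDITION & SPEC =====
def Spec_get_parity_bits (k : Int) (out : Int) : Prop := out = get_parity_bits_alt k
instance (k : Int) (out : Int) : Decidable (Spec_get_parity_bits k out) := by unfold Spec_get_parity_bits; infer_instance

-- ===== CLAIM (what is proved, stated in full; the proofs are below) =====
def Claim_equal_get_parity_bits : Prop := ∀ (k : Int), Dom_get_parity_bits k → Spec_get_parity_bits k (get_parity_bits k)

-- ===== LEMMAS AND PROOFS =====

-- the predicate 2^p - p ≥ d is monotone in p
theorem pvPredMono (d : Int) {p q : Nat} (hpq : p ≤ q) (hp : d ≤ 2 ^ p - (p : Int)) :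
    d ≤ 2 ^ q - (q : Int) := by
  induction q with
  | zero =>
    have : p = 0 := by omega
    subst this; exact hp
  | succ n ih =>
    rcases Nat.lt_or_ge p (n + 1) with h | h
    · have hn := ih (by omega)
      have h1 : (1 : Int) ≤ 2 ^ n := one_le_pow₀ (by norm_num)
      have : (2 : Int) ^ (n + 1) = 2 ^ n + 2 ^ n := by ring
      push_cast
      push_cast at hn
      omega
    · have : p = n + 1 := by omega
      subst this; exact hp

theorem pvALoopFound (d : Int) (p : Nat) (h : d ≤ 2 ^ p - (p : Int)) : pvALoop d p = (p : Int) := by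
  unfold pvALoop; simp [h]

theorem pvALoopSkip (d : Int) (p : Nat) (h : ¬ d ≤ 2 ^ p - (p : Int)) :
    pvALoop d p = pvALoop d (p + 1) := by
  conv_lhs => unfold pvALoop
  simp [h]

-- if the predicate fails at mid, A's scan from any lo ≤ mid equals the scan from mid+1
theorem pvALoopCongr (d : Int) (mid : Nat) (hmid : ¬ d ≤ 2 ^ mid - (mid : Int)) :
    ∀ n lo, mid - lo = n → lo ≤ mid → pvALoop d lo = pvALoop d (mid + 1) := by
  intro n
  induction n with
  | zero =>
    intro lo h1 h2
    have : lo = mid := by omega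
    subst this
    exact pvALoopSkip d lo hmid
  | succ m ih =>
    intro lo h1 h2
    have hlo : ¬ d ≤ 2 ^ lo - (lo : Int) := fun h => hmid (pvPredMono d h2 h)
    rw [pvALoopSkip d lo hlo]
    exact ih (lo + 1) (by omega) (by omega)

-- the binary search equals A's linear scan when the upper bound satisfies the predicate
theorem pvBLoopEqALoop (d : Int) :
    ∀ (n lo hi : Nat), hi - lo = n → lo ≤ hi → d ≤ 2 ^ hi - (hi : Int) →
      ((pvBLoop d lo hi : Nat) : Int) = pvALoop d lo := by
  intro n
  induction n using Nat.strong_induction_on with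
  | _ n ih =>
    intro lo hi hn hle hhi
    unfold pvBLoop
    by_cases hlt : lo < hi
    · simp only [hlt, if_true]
      set mid := (lo + hi) / 2 with hmid
      have hm1 : lo ≤ mid := by omega
      have hm2 : mid < hi := by omega
      by_cases hp : 2 ^ mid - (mid : Int) ≥ d
      · simp only [hp, if_true]
        exact ih (mid - lo) (by omega) lo mid rfl hm1 hp
      · simp only [hp, if_false]
        rw [ih (hi - (mid + 1)) (by omega) (mid + 1) hi rfl (by omega) hhi]
        exact (pvALoopCongr d mid hp (mid - lo) lo rfl hm1).symm
    · simp only [hlt, if_false]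
      have : lo = hi := by omega
      subst this
      exact (pvALoopFound d lo hhi).symm

-- the bit_length-based upper bound satisfies the predicate (for d > 2)
theorem pvHiSat (d : Int) (hd : 2 < d) :
    d ≤ 2 ^ (Nat.max 2 (Nat.log2 d.toNat + 1) + 2) - ((Nat.max 2 (Nat.log2 d.toNat + 1) + 2 : Nat) : Int) := by
  set m := d.toNat with hm
  have hm3 : 3 ≤ m := by omega
  have hbl : 1 ≤ Nat.log2 m := (Nat.le_log2 (by omega)).mpr (by omega)
  set bl := Nat.log2 m + 1 with hbl2
  have hmax : Nat.max 2 bl = bl := Nat.max_eq_right (by omega)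
  rw [hmax]
  have hlt : m < 2 ^ bl := by
    have := Nat.lt_log2_self (n := m)
    simpa [hbl2] using this
  have hblt : bl < 2 ^ bl := Nat.lt_two_pow_self
  have hnat : m + (bl + 2) ≤ 2 ^ (bl + 2) := by
    have : 2 ^ (bl + 2) = 2 ^ bl * 4 := by ring
    omega
  have hdm : d = (m : Int) := by omega
  rw [hdm]
  have := (Nat.cast_le (α := Int)).mpr hnat
  push_cast at this ⊢
  linarith

-- ===== VERDICT (by name: the statement is the Claim_ definition above) =====
theorem get_parity_bits_spec : Claim_equal_get_parity_bits := by
  intro k _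
  unfold Spec_get_parity_bits get_parity_bits get_parity_bits_alt
  set d := k + 1 with hd
  by_cases h2 : d ≤ 2
  · simp only [h2, if_true]
    have : d ≤ 2 ^ 2 - ((2 : Nat) : Int) := by push_cast; omega
    rw [pvALoopFound d 2 this]
    norm_num
  · simp only [h2, if_false]
    have hd2 : 2 < d := by omega
    have hhi := pvHiSat d hd2
    have hle : 2 ≤ Nat.max 2 (Nat.log2 d.toNat + 1) + 2 := by omega
    exact (pvBLoopEqALoop d _ 2 _ rfl hle hhi).symm
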